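-- pv_equiv track=rewrite | github.com/anrouxel/gaphor | utils/model/gen_uml.py | parse_association_name
-- ===== SOURCE A (Python) =====
-- def parse_association_name(name):
--     # First remove spaces
--     name = name.replace(" ", "")
--     derived = False
--     # Check if this is a derived union
--     while name and not name[0].isalpha():
--         if name[0] == "/":
--             derived = True
--         name = name[1:]
--     return derived, name
-- ===== SOURCE B (Python) =====
-- def parse_association_name(name):
--     name = name.replace(" ", "")
--     idx = next((i for i, c in enumerate(name) if c.isalpha()), len(name))
--     return "/" in name[:idx], name[idx:]
-- ===== Notes on version B (the rewrite author's own statement) =====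
-- stated objective: simpler
-- what changed: Replaces A's destructive character-by-character stripping loop (with a mutable derived flag) by a single first-alpha-index computation followed by a membership test on the prefix and one slice.
import Mathlib
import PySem

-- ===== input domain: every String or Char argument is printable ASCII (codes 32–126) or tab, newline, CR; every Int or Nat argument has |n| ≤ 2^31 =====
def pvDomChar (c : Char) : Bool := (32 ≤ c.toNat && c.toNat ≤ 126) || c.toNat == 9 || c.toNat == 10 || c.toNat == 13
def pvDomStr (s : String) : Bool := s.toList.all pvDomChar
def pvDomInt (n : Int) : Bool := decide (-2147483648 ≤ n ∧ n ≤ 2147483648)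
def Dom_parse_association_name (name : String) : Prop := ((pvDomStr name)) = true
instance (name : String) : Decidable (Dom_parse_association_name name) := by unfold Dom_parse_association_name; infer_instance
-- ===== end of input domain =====

-- ===== PORT A =====
-- B changes the decomposition: one first-alpha-index scan plus a prefix membership test, instead of A's stripping loop ('simpler').
-- A's while loop: drop leading non-alpha chars one at a time, setting derived on '/'
def pvLoopA (derived : Bool) : List Char → Bool × List Char
  | [] => (derived, [])
  | c :: rest =>
    if PySem.Chars.isalpha c then (derived, c :: rest)
    else pvLoopA (if c = '/' then true else derived) rest

def parse_association_name (name : String) : Bool × String :=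
  let cs := PySem.Chars.replace name.toList [' '] []   -- name.replace(" ", "")
  let r := pvLoopA false cs
  (r.1, String.ofList r.2)

-- ===== PORT B =====
def parse_association_name_alt (name : String) : Bool × String :=
  let cs := PySem.Chars.replace name.toList [' '] []   -- name.replace(" ", "")
  let idx := cs.findIdx (fun c => PySem.Chars.isalpha c)   -- next((i for i,c in enumerate(name) if c.isalpha()), len(name))
  -- '"/" in name[:idx]' on a single character = membership in the prefix (exact)
  ((cs.take idx).contains '/', String.ofList (cs.drop idx))

-- ===== PRECONDITION & SPEC =====
def Spec_parse_association_name (name : String) (out : Bool × String) : Prop := out = parse_association_name_alt name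
instance (name : String) (out : Bool × String) : Decidable (Spec_parse_association_name name out) := by unfold Spec_parse_association_name; infer_instance

-- ===== CLAIM (what is proved, stated in full; the proofs are below) =====
def Claim_equal_parse_association_name : Prop := ∀ (name : String), Dom_parse_association_name name → Spec_parse_association_name name (parse_association_name name)

-- ===== LEMMAS AND PROOFS =====
theorem pvLoopA_eq (d : Bool) (cs : List Char) :
    pvLoopA d cs =
      ((d || (cs.take (cs.findIdx (fun c => PySem.Chars.isalpha c))).contains '/'),
       cs.drop (cs.findIdx (fun c => PySem.Chars.isalpha c))) := by
  induction cs generalizing d with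
  | nil => simp [pvLoopA]
  | cons c rest ih =>
    by_cases h : PySem.Chars.isalpha c = true
    · simp [pvLoopA, h, List.findIdx_cons]
    · rw [pvLoopA, if_neg h, ih]
      simp only [Bool.not_eq_true] at h
      simp [List.findIdx_cons, h, List.take_succ_cons, List.drop_succ_cons]
      by_cases hc : '/' = c
      · simp [← hc]
      · simp [hc, Ne.symm hc]

-- ===== VERDICT (by name: the statement is the Claim_ definition above) =====
theorem parse_association_name_spec : Claim_equal_parse_association_name := by
  intro name _
  unfold Spec_parse_association_name parse_association_name parse_association_name_alt
  simp [pvLoopA_eq]
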